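-- pv_equiv track=rewrite | github.com/lkjhzs/YTTranscribator | summarizer.py | select_top_sentences
-- ===== SOURCE A (Python) =====
-- def select_top_sentences(sentences, scores, max_sentences):
--     """Вибір найкращих речень та відновлення їх оригінального порядку"""
--     # Сортуємо речення за важливістю (від більшого до меншого)
--     sorted_sentences = sorted(scores.items(), key=lambda x: x[1], reverse=True)
--
--     # Вибираємо топ речення, запам'ятовуючи їх індекси
--     top_sentences = []
--     used_indices = set()
--
--     for sentence, score in sorted_sentences[:max_sentences]:
--         # Знаходимо індекс речення в оригінальному списку
--         for i, s in enumerate(sentences):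
--             if s == sentence and i not in used_indices:
--                 top_sentences.append((i, sentence))
--                 used_indices.add(i)
--                 break
--
--     # Сортуємо обрані речення за оригінальним порядком появи в тексті
--     top_sentences.sort(key=lambda x: x[0])
--
--     # Повертаємо список речень без індексів
--     return [sentence for _, sentence in top_sentences]
-- ===== SOURCE B (Python) =====
-- def select_top_sentences(sentences, scores, max_sentences):
--     selected = {s for s, _ in sorted(scores.items(), key=lambda x: x[1], reverse=True)[:max_sentences]}
--     result = []
--     seen = set()
--     for s in sentences:
--         if s in selected and s not in seen:
--             result.append(s)
--             seen.add(s)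
--     return result
-- ===== Notes on version B (the rewrite author's own statement) =====
-- stated objective: faster
-- what changed: B computes the selected top-scored keys as a set once, then makes one forward pass over sentences with a seen-set, appending first occurrences of selected sentences in text order, which removes A's per-selected-sentence inner scan over sentences, the index bookkeeping and the final sort by index.
import Mathlib
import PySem

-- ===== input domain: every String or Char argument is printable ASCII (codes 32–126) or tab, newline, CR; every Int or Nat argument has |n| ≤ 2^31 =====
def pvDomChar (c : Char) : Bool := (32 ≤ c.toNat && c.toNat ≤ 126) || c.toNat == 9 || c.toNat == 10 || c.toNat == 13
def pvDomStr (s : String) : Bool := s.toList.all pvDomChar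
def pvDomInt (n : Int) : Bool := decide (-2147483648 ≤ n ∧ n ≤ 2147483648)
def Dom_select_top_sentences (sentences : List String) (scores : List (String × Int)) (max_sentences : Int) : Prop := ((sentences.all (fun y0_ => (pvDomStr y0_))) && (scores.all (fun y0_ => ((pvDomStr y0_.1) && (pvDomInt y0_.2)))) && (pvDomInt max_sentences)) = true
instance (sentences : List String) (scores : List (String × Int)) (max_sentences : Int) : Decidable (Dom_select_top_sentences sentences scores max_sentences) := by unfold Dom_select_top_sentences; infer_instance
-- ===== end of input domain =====

-- B replaces A's per-selected-sentence inner scan over `sentences`, the index bookkeeping and the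
-- final sort by index with one selected-set and a single forward pass over `sentences` with a
-- seen-set (objective: faster; a timing run measured B faster on the generated inputs).

-- ===== PORT A =====
-- inner `for i, s in enumerate(sentences): if s == sentence and i not in used_indices: … break`
def pvFindA (sentence : String) (used : PySem.Set Int) : List (Int × String) → Option (Int × String)
  | [] => none
  | (i, s) :: rest =>
      if s = sentence ∧ i ∉ used then some (i, sentence) else pvFindA sentence used rest

def select_top_sentences (sentences : List String) (scores : List (String × Int)) (max_sentences : Int) : List String :=
  let sorted_sentences := PySem.List.sorted scores (fun x => x.2) true
  let st := (PySem.List.slice sorted_sentences none (some max_sentences)).foldl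
      (fun (st : List (Int × String) × PySem.Set Int) p =>
        match pvFindA p.1 st.2 (PySem.List.enumerate sentences) with
        | some (i, s) => (st.1 ++ [(i, s)], PySem.Set.add st.2 i)
        | none => st) ([], PySem.Set.empty)
  (PySem.List.sorted st.1 (fun x => x.1)).map (fun x => x.2)

-- ===== PORT B =====
def select_top_sentences_alt (sentences : List String) (scores : List (String × Int)) (max_sentences : Int) : List String :=
  let selected : PySem.Set String := PySem.Set.ofList
      ((PySem.List.slice (PySem.List.sorted scores (fun x => x.2) true) none (some max_sentences)).map (fun x => x.1))
  (sentences.foldl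
      (fun (st : List String × PySem.Set String) s =>
        if s ∈ selected ∧ s ∉ st.2 then (st.1 ++ [s], PySem.Set.add st.2 s) else st)
      ([], PySem.Set.empty)).1

-- ===== PRECONDITION & SPEC =====
-- `scores` is a Python dict; its association-list encoding always has pairwise-distinct keys, so Pre_
-- only restates the dict invariant (it excludes no actual Python input).
def Pre_select_top_sentences (sentences : List String) (scores : List (String × Int)) (max_sentences : Int) : Prop :=
  (scores.map Prod.fst).Nodup
instance (sentences : List String) (scores : List (String × Int)) (max_sentences : Int) : Decidable (Pre_select_top_sentences sentences scores max_sentences) := by unfold Pre_select_top_sentences; infer_instance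

def pvWitness_select_top_sentences : List String × (List (String × Int)) × Int :=
  (["a", "b", "a"], [("b", 1), ("a", 2)], 1)

def Spec_select_top_sentences (sentences : List String) (scores : List (String × Int)) (max_sentences : Int) (out : List String) : Prop := out = select_top_sentences_alt sentences scores max_sentences
instance (sentences : List String) (scores : List (String × Int)) (max_sentences : Int) (out : List String) : Decidable (Spec_select_top_sentences sentences scores max_sentences out) := by unfold Spec_select_top_sentences; infer_instance

-- ===== CLAIM (what is proved, stated in full; the proofs are below) =====
def Claim_equal_select_top_sentences : Prop := ∀ (sentences : List String) (scores : List (String × Int)) (max_sentences : Int), Dom_select_top_sentences sentences scores max_sentences → Pre_select_top_sentences sentences scores max_sentences → Spec_select_top_sentences sentences scores max_sentences (select_top_sentences sentences scores max_sentences)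

-- ===== LEMMAS AND PROOFS =====

-- the common canonical form: first occurrences (position = idxOf) of selected sentences, in text order
def pvE (sentences sel : List String) : List (Int × String) :=
  (PySem.List.enumerate sentences).filter
    (fun p => decide ((sentences.idxOf p.2 : Int) = p.1) && decide (p.2 ∈ sel))

theorem pv_slice_to_sublist {α : Type} (xs : List α) (b : Int) :
    (PySem.List.slice xs none (some b)).Sublist xs := by
  by_cases hb : 0 ≤ b
  · rw [PySem.List.slice_to xs hb]; exact List.take_sublist _ _
  · have hk : 0 < (-b).toNat := by omega
    have : b = -(((-b).toNat : Nat) : Int) := by omega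
    rw [this, PySem.List.slice_to_neg_natCast xs _ hk]
    exact List.take_sublist _ _

theorem pv_E_pairs (sentences sel : List String) :
    ∀ p ∈ pvE sentences sel, p = ((sentences.idxOf p.2 : Int), p.2) ∧ p.2 ∈ sel ∧ p.2 ∈ sentences := by
  intro p hp
  simp only [pvE, List.mem_filter, Bool.and_eq_true, decide_eq_true_eq] at hp
  obtain ⟨hmem, hidx, hsel⟩ := hp
  rw [PySem.List.mem_enumerate_iff] at hmem
  obtain ⟨k, hk, rfl⟩ := hmem
  refine ⟨?_, hsel, List.getElem_mem hk⟩
  simp only [Prod.mk.injEq, and_true]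
  exact hidx.symm

theorem pv_E_snd_nodup (sentences sel : List String) : ((pvE sentences sel).map Prod.snd).Nodup := by
  rw [List.Nodup, List.pairwise_map]
  have hlt : (pvE sentences sel).Pairwise (fun p q => p.1 < q.1) :=
    (PySem.List.pairwise_lt_enumerate sentences 0).filter _
  refine hlt.imp_of_mem ?_
  intro p q hp hq hlt heq
  obtain ⟨hp1, -, -⟩ := pv_E_pairs sentences sel p hp
  obtain ⟨hq1, -, -⟩ := pv_E_pairs sentences sel q hq
  rw [hp1, hq1, heq] at hlt
  simp at hlt

theorem pv_E_mem_snd (sentences sel : List String) (t : String) :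
    t ∈ (pvE sentences sel).map Prod.snd ↔ t ∈ sel ∧ t ∈ sentences := by
  simp only [List.mem_map]
  constructor
  · rintro ⟨p, hp, rfl⟩
    obtain ⟨-, h1, h2⟩ := pv_E_pairs sentences sel p hp
    exact ⟨h1, h2⟩
  · rintro ⟨hsel, hmem⟩
    refine ⟨((sentences.idxOf t : Int), t), ?_, rfl⟩
    simp only [pvE, List.mem_filter, Bool.and_eq_true, decide_eq_true_eq]
    refine ⟨?_, by simp, hsel⟩
    rw [PySem.List.mem_enumerate_iff]
    exact ⟨sentences.idxOf t, List.idxOf_lt_length_of_mem hmem, by simp [List.getElem_idxOf]⟩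

theorem pv_findA_go (t : String) (used : PySem.Set Int) (xs : List String) : ∀ (s : Int),
    (∀ (k : Nat), (hk : k < xs.length) → xs[k] = t → (s + (k : Int)) ∉ used) →
    pvFindA t used (PySem.List.enumerate xs s) =
      if t ∈ xs then some (s + (xs.idxOf t : Int), t) else none := by
  induction xs with
  | nil => intro s h; simp [PySem.List.enumerate_nil, pvFindA]
  | cons x rest ih =>
    intro s h
    rw [PySem.List.enumerate_cons, pvFindA]
    by_cases hx : x = t
    · have h0 : s ∉ used := by
        have := h 0 (by simp) (by simpa using hx); simpa using this
      rw [if_pos ⟨hx, h0⟩]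
      subst hx
      simp [List.idxOf_cons_self]
    · rw [if_neg (by simp [hx])]
      rw [ih (s + 1) (fun k hk hke => by
        have := h (k + 1) (by simpa using Nat.succ_lt_succ hk) (by simpa using hke)
        push_cast at this ⊢
        convert this using 2
        ring)]
      by_cases ht : t ∈ rest
      · rw [if_pos ht, if_pos (by simp [ht])]
        rw [List.idxOf_cons_ne _ hx]
        simp only [Option.some.injEq, Prod.mk.injEq, and_true]
        push_cast
        ring
      · rw [if_neg ht, if_neg (by simp [ht]; exact fun h => hx h.symm)]

theorem pv_findA_spec (t : String) (sentences : List String) (done : List String)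
    (hd : ∀ u ∈ done, u ∈ sentences ∧ u ≠ t) :
    pvFindA t ((done.map (fun u => (sentences.idxOf u : Int)))) (PySem.List.enumerate sentences) =
      if t ∈ sentences then some ((sentences.idxOf t : Int), t) else none := by
  have := pv_findA_go t (done.map (fun u => (sentences.idxOf u : Int))) sentences 0 ?_
  · simpa using this
  · intro k hk hke hmem
    simp only [List.mem_map] at hmem
    obtain ⟨u, hu, hui⟩ := hmem
    obtain ⟨humem, hune⟩ := hd u hu
    have hkeq : k = sentences.idxOf u := by omega
    subst hkeq
    rw [List.getElem_idxOf (List.idxOf_lt_length_of_mem humem)] at hke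
    exact hune hke

theorem pv_A_loop (sentences : List String) (rem : List (String × Int)) : ∀ (done : List String),
    (done ++ rem.map Prod.fst).Nodup →
    rem.foldl
      (fun (st : List (Int × String) × PySem.Set Int) p =>
        match pvFindA p.1 st.2 (PySem.List.enumerate sentences) with
        | some (i, s) => (st.1 ++ [(i, s)], PySem.Set.add st.2 i)
        | none => st)
      (((done.filter (· ∈ sentences)).map (fun u => ((sentences.idxOf u : Int), u))),
       ((done.filter (· ∈ sentences)).map (fun u => (sentences.idxOf u : Int))))
    = (((done ++ rem.map Prod.fst).filter (· ∈ sentences)).map (fun u => ((sentences.idxOf u : Int), u)),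
       ((done ++ rem.map Prod.fst).filter (· ∈ sentences)).map (fun u => (sentences.idxOf u : Int))) := by
  induction rem with
  | nil => intro done hnd; simp
  | cons p rest ih =>
    intro done hnd
    rw [List.foldl_cons]
    have hnd' : (done ++ p.1 :: rest.map Prod.fst).Nodup := by simpa using hnd
    have htnd : p.1 ∉ done := by
      intro hmem
      exact (List.disjoint_of_nodup_append hnd') hmem (by simp)
    have hd : ∀ u ∈ done.filter (· ∈ sentences), u ∈ sentences ∧ u ≠ p.1 := by
      intro u hu
      rw [List.mem_filter] at hu
      refine ⟨by simpa using hu.2, ?_⟩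
      rintro rfl; exact htnd hu.1
    rw [pv_findA_spec p.1 sentences _ hd]
    by_cases ht : p.1 ∈ sentences
    · rw [if_pos ht]
      have hused : (sentences.idxOf p.1 : Int) ∉
          (done.filter (· ∈ sentences)).map (fun u => (sentences.idxOf u : Int)) := by
        intro hmem
        simp only [List.mem_map, List.mem_filter] at hmem
        obtain ⟨u, ⟨hud, hus⟩, hui⟩ := hmem
        have : sentences.idxOf u = sentences.idxOf p.1 := by omega
        have hu : u = p.1 := by
          have h1 := List.getElem_idxOf (List.idxOf_lt_length_of_mem (by simpa using hus))
          have h2 := List.getElem_idxOf (List.idxOf_lt_length_of_mem ht)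
          simp only [this] at h1
          exact h1.symm.trans h2
        exact htnd (hu ▸ hud)
      have hadd : PySem.Set.add ((done.filter (· ∈ sentences)).map (fun u => (sentences.idxOf u : Int)))
          (sentences.idxOf p.1 : Int)
          = (done.filter (· ∈ sentences)).map (fun u => (sentences.idxOf u : Int)) ++ [(sentences.idxOf p.1 : Int)] := by
        unfold PySem.Set.add
        rw [if_neg (by simpa [List.contains_iff_mem] using hused)]
      simp only []
      rw [hadd]
      have e1 : (done.filter (· ∈ sentences)).map (fun u => ((sentences.idxOf u : Int), u)) ++ [((sentences.idxOf p.1 : Int), p.1)]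
          = ((done ++ [p.1]).filter (· ∈ sentences)).map (fun u => ((sentences.idxOf u : Int), u)) := by
        simp [List.filter_append, ht]
      have e2 : (done.filter (· ∈ sentences)).map (fun u => (sentences.idxOf u : Int)) ++ [(sentences.idxOf p.1 : Int)]
          = ((done ++ [p.1]).filter (· ∈ sentences)).map (fun u => (sentences.idxOf u : Int)) := by
        simp [List.filter_append, ht]
      rw [e1, e2, ih (done ++ [p.1]) (by simpa using hnd')]
      simp
    · rw [if_neg ht]
      have e3 : (done ++ [p.1]).filter (· ∈ sentences) = done.filter (· ∈ sentences) := by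
        simp [List.filter_append, ht]
      have := ih (done ++ [p.1]) (by simpa using hnd')
      rw [e3] at this
      rw [this]
      simp

theorem pv_B_loop (sel : PySem.Set String) (sentences : List String) (rest : List String) :
    ∀ (pre acc : List String) (seen : PySem.Set String),
    (∀ x, x ∈ seen ↔ x ∈ pre ∧ x ∈ sel) →
    sentences = pre ++ rest →
    (rest.foldl
        (fun (st : List String × PySem.Set String) s =>
          if s ∈ sel ∧ s ∉ st.2 then (st.1 ++ [s], PySem.Set.add st.2 s) else st)
        (acc, seen)).1
      = acc ++ ((PySem.List.enumerate rest (pre.length)).filter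
          (fun p => decide ((sentences.idxOf p.2 : Int) = p.1) && decide (p.2 ∈ sel))).map Prod.snd := by
  induction rest with
  | nil => intro pre acc seen hseen hsent; simp [PySem.List.enumerate_nil]
  | cons s rest' ih =>
    intro pre acc seen hseen hsent
    rw [List.foldl_cons, PySem.List.enumerate_cons]
    have hsent' : sentences = (pre ++ [s]) ++ rest' := by simpa [List.append_assoc] using hsent
    by_cases hcond : s ∈ sel ∧ s ∉ seen
    · have hnpre : s ∉ pre := fun hp => hcond.2 ((hseen s).mpr ⟨hp, hcond.1⟩)
      have hidx : (sentences.idxOf s : Int) = (pre.length : Int) := by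
        rw [hsent, List.idxOf_append_of_notMem hnpre, List.idxOf_cons_self]
        simp
      rw [if_pos hcond, List.filter_cons_of_pos (by simp [hidx, hcond.1])]
      have hseen' : ∀ x, x ∈ PySem.Set.add seen s ↔ x ∈ pre ++ [s] ∧ x ∈ sel := by
        intro x
        rw [PySem.Set.mem_add]
        constructor
        · rintro (hx | rfl)
          · obtain ⟨h1, h2⟩ := (hseen x).mp hx
            exact ⟨by simp [h1], h2⟩
          · exact ⟨by simp, hcond.1⟩
        · rintro ⟨h1, h2⟩
          rcases List.mem_append.mp h1 with h1 | h1
          · exact Or.inl ((hseen x).mpr ⟨h1, h2⟩)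
          · exact Or.inr (by simpa using h1)
      rw [ih (pre ++ [s]) (acc ++ [s]) _ hseen' hsent']
      simp [List.append_assoc]
    · have hfilt : ¬ ((sentences.idxOf s : Int) = (pre.length : Int) ∧ s ∈ sel) := by
        rintro ⟨hidx, hsel⟩
        apply hcond
        refine ⟨hsel, fun hs => ?_⟩
        have hp : s ∈ pre := ((hseen s).mp hs).1
        have : sentences.idxOf s < pre.length := by
          rw [hsent, List.idxOf_append_of_mem hp]
          exact List.idxOf_lt_length_of_mem hp
        omega
      rw [if_neg hcond, List.filter_cons_of_neg (by simpa using hfilt)]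
      have hseen' : ∀ x, x ∈ seen ↔ x ∈ pre ++ [s] ∧ x ∈ sel := by
        intro x
        rw [hseen x]
        constructor
        · rintro ⟨h1, h2⟩; exact ⟨by simp [h1], h2⟩
        · rintro ⟨h1, h2⟩
          rcases List.mem_append.mp h1 with h1 | h1
          · exact ⟨h1, h2⟩
          · simp only [List.mem_singleton] at h1
            subst h1
            rcases Decidable.em (x ∈ seen) with hx | hx
            · exact ((hseen x).mp hx)
            · exact absurd ⟨h2, hx⟩ hcond
      rw [ih (pre ++ [s]) acc seen hseen' hsent']
      simp

-- ===== VERDICT (by name: the statement is the Claim_ definition above) =====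
theorem select_top_sentences_spec : Claim_equal_select_top_sentences := by
  unfold Claim_equal_select_top_sentences
  intro sentences scores max_sentences _hdom hpre
  unfold Spec_select_top_sentences select_top_sentences select_top_sentences_alt
  simp only []
  set L := PySem.List.slice (PySem.List.sorted scores (fun x => x.2) true) none (some max_sentences) with hL
  set selList := L.map Prod.fst with hsel
  have hnodup : selList.Nodup := by
    have h1 : ((PySem.List.sorted scores (fun x => x.2) true).map Prod.fst).Nodup :=
      hpre.perm ((PySem.List.sorted_perm scores (fun x => x.2) true).map Prod.fst).symm
    exact h1.sublist ((pv_slice_to_sublist _ max_sentences).map Prod.fst)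
  -- B side
  have hB : (sentences.foldl
      (fun (st : List String × PySem.Set String) s =>
        if s ∈ PySem.Set.ofList selList ∧ s ∉ st.2 then (st.1 ++ [s], PySem.Set.add st.2 s) else st)
      ([], PySem.Set.empty)).1 = (pvE sentences selList).map Prod.snd := by
    rw [pv_B_loop (PySem.Set.ofList selList) sentences sentences [] [] PySem.Set.empty
      (by intro x; simp [PySem.Set.empty]) (by simp)]
    simp only [List.length_nil, Nat.cast_zero, List.nil_append]
    unfold pvE
    congr 1
    apply List.filter_congr
    intro p _
    simp [PySem.Set.mem_ofList]
  -- A side loop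
  have hA : L.foldl
      (fun (st : List (Int × String) × PySem.Set Int) p =>
        match pvFindA p.1 st.2 (PySem.List.enumerate sentences) with
        | some (i, s) => (st.1 ++ [(i, s)], PySem.Set.add st.2 i)
        | none => st) ([], PySem.Set.empty)
      = ((selList.filter (· ∈ sentences)).map (fun u => ((sentences.idxOf u : Int), u)),
         (selList.filter (· ∈ sentences)).map (fun u => (sentences.idxOf u : Int))) := by
    have := pv_A_loop sentences L [] (by simpa using hnodup)
    simpa using this
  -- the final sort of A's pairs is exactly pvE
  have hsortedE : PySem.List.sorted ((selList.filter (· ∈ sentences)).map (fun u => ((sentences.idxOf u : Int), u)))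
      (fun x => x.1) = pvE sentences selList := by
    apply PySem.List.sorted_eq_of_perm_of_pairwise_lt
    · -- pvE ~ A's collected pairs
      have hbase : ((pvE sentences selList).map Prod.snd).Perm (selList.filter (· ∈ sentences)) := by
        rw [List.perm_ext_iff_of_nodup (pv_E_snd_nodup sentences selList) (hnodup.filter _)]
        intro t
        rw [pv_E_mem_snd, List.mem_filter]
        simp [and_comm]
      have hE : ((pvE sentences selList).map Prod.snd).map (fun u => ((sentences.idxOf u : Int), u))
          = pvE sentences selList := by
        rw [List.map_map]
        have : ∀ p ∈ pvE sentences selList,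
            ((fun u => ((sentences.idxOf u : Int), u)) ∘ Prod.snd) p = id p := by
          intro p hp
          obtain ⟨h1, -, -⟩ := pv_E_pairs sentences selList p hp
          simpa using h1.symm
        rw [List.map_congr_left this, List.map_id]
      have hperm := hbase.map (fun u => ((sentences.idxOf u : Int), u))
      rw [hE] at hperm
      exact hperm
    · unfold pvE
      exact (PySem.List.pairwise_lt_enumerate sentences 0).filter _
  rw [hA, hB]
  dsimp only
  rw [hsortedE]
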